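-- pv_equiv track=rewrite | github.com/Asteraceaeaa/school | forz/1.py | zz
-- ===== SOURCE A (Python) =====
-- def zz(n):
--     a='0000' + bin(n)[2:]
--     na = ''
--     for i in a:
--         if int(i)==0:
--          na+='1'
--         else:
--             na+='0'
--     number=int(na,2)
--     raznost=number-n
--     return  raznost
-- ===== SOURCE B (Python) =====
-- def zz(n):
--     a = '0000' + bin(n)[2:]
--     number = (1 << len(a)) - 1 - int(a, 2)
--     return number - n
-- ===== Notes on version B (the rewrite author's own statement) =====
-- stated objective: idiomatic
-- what changed: Replaces the per-character flip loop and reparse with a closed-form arithmetic bit-complement of int(a,2) against an all-ones mask of width len(a), keeping the same padded binary string so exception behaviour on negatives is unchanged.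
import Mathlib
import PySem

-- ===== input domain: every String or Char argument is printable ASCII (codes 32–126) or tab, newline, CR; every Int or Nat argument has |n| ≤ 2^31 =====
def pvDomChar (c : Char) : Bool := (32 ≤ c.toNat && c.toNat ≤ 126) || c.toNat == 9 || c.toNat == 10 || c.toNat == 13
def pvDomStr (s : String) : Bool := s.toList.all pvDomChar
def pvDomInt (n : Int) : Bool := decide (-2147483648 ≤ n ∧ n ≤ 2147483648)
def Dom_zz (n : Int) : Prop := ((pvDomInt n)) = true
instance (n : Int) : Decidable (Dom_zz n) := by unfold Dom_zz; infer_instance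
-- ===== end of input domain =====

-- B replaces A's per-character flip loop and reparse with the closed-form complement
-- of int(a,2) against an all-ones mask of width len(a) over the same padded binary string (objective: idiomatic).


-- ===== PORT A =====
-- bin(n)[2:] for n ≥ 0 (Python's binary digits, most significant first); exact on 0 ≤ n,
-- the only inputs Pre_zz admits (bin of a negative makes int(a,2) raise ValueError in A and B).
def pvBinNat (n : Nat) : List Char :=
  if h : n = 0 then [] else pvBinNat (n / 2) ++ [if n % 2 == 1 then '1' else '0']
decreasing_by exact Nat.div_lt_self (Nat.pos_of_ne_zero h) (by norm_num)

def pvBinStr (n : Int) : List Char := if n ≤ 0 then ['0'] else pvBinNat n.toNat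

-- int(s, 2): parse a string of '0'/'1' chars, most significant first (exact on such strings).
def pvParseBin (l : List Char) : Int :=
  l.foldl (fun acc c => 2 * acc + (if c == '1' then 1 else 0)) 0

-- A, step for step: build a, flip each char into na (int(i)==0 ↔ the char is '0',
-- exact since every char of a is '0' or '1'), parse na, subtract n.
def zz (n : Int) : Int :=
  let a : List Char := ['0','0','0','0'] ++ pvBinStr n
  let na : List Char := a.foldl (fun na c => na ++ [if c == '0' then '1' else '0']) []
  let number : Int := pvParseBin na
  let raznost : Int := number - n
  raznost

-- ===== PORT B =====
def zz_alt (n : Int) : Int :=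
  let a : List Char := ['0','0','0','0'] ++ pvBinStr n
  let number : Int := 2 ^ a.length - 1 - pvParseBin a
  number - n

-- ===== PRECONDITION & SPEC =====
-- Pre_ excludes exactly the negative inputs, on which both A and B raise ValueError (int('…-…', 2)).
def Pre_zz (n : Int) : Prop := 0 ≤ n
instance (n : Int) : Decidable (Pre_zz n) := by unfold Pre_zz; infer_instance
def pvWitness_zz : Int := (5)

def Spec_zz (n : Int) (out : Int) : Prop := out = zz_alt n
instance (n : Int) (out : Int) : Decidable (Spec_zz n out) := by unfold Spec_zz; infer_instance

-- ===== CLAIM (what is proved, stated in full; the proofs are below) =====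
def Claim_equal_zz : Prop := ∀ (n : Int), Dom_zz n → Pre_zz n → Spec_zz n (zz n)

-- ===== LEMMAS AND PROOFS =====
lemma pvBinNat_binary (n : Nat) : ∀ c ∈ pvBinNat n, c = '0' ∨ c = '1' := by
  induction n using Nat.strong_induction_on with
  | _ n ih =>
    rw [pvBinNat]
    split
    · simp
    · intro c hc
      rcases List.mem_append.mp hc with h | h
      · exact ih (n / 2) (Nat.div_lt_self (Nat.pos_of_ne_zero (by assumption)) (by norm_num)) c h
      · simp only [List.mem_singleton] at h
        subst h; split <;> simp

lemma pvBinStr_binary (n : Int) : ∀ c ∈ pvBinStr n, c = '0' ∨ c = '1' := by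
  unfold pvBinStr
  split
  · simp
  · exact pvBinNat_binary _

lemma foldl_flip_eq_map (l : List Char) : ∀ acc : List Char,
    l.foldl (fun na c => na ++ [if c == '0' then '1' else '0']) acc
      = acc ++ l.map (fun c => if c == '0' then '1' else '0') := by
  induction l with
  | nil => simp
  | cons c t ih =>
    intro acc
    simp only [List.foldl_cons, List.map_cons]
    rw [ih]
    simp [List.append_assoc]

lemma parse_flip (l : List Char) (hl : ∀ c ∈ l, c = '0' ∨ c = '1') :
    ∀ a b : Int,
      (l.map (fun c => if c == '0' then '1' else '0')).foldl
          (fun acc c => 2 * acc + (if c == '1' then 1 else 0)) a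
        + l.foldl (fun acc c => 2 * acc + (if c == '1' then 1 else 0)) b
      = (a + b + 1) * 2 ^ l.length - 1 := by
  induction l with
  | nil => intro a b; simp; try ring
  | cons c t ih =>
    intro a b
    have hc := hl c (List.mem_cons_self ..)
    have ht : ∀ c ∈ t, c = '0' ∨ c = '1' := fun x hx => hl x (List.mem_cons_of_mem _ hx)
    simp only [List.map_cons, List.foldl_cons, List.length_cons]
    rcases hc with h | h <;> subst h <;> rw [ih ht] <;> simp <;> try ring

theorem zz_spec : Claim_equal_zz := by
  intro n _ _
  unfold Spec_zz zz zz_alt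
  simp only
  rw [foldl_flip_eq_map, List.nil_append]
  have hbin : ∀ c ∈ (['0','0','0','0'] ++ pvBinStr n), c = '0' ∨ c = '1' := by
    intro c hc
    rcases List.mem_append.mp hc with h | h
    · fin_cases h <;> simp
    · exact pvBinStr_binary n c h
  have h := parse_flip (['0','0','0','0'] ++ pvBinStr n) hbin 0 0
  unfold pvParseBin
  omega
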